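-- pv_equiv track=rewrite | github.com/0417taehyun/Algorithm | LeetCode/Python/1_Easy/1822.py | solution
-- ===== SOURCE A (Python) =====
-- def solution(nums: list[int]) -> int:
--     answer: int = 1
--     for number in nums:
--         if number == 0:
--             return 0
--         elif number < 0:
--             answer *= -1
--
--     return answer
-- ===== SOURCE B (Python) =====
-- def solution(nums: list[int]) -> int:
--     if 0 in nums:
--         return 0
--     neg = sum(1 for x in nums if x < 0)
--     return -1 if neg % 2 else 1
-- ===== Notes on version B (the rewrite author's own statement) =====
-- stated objective: simpler
-- what changed: Replaced A's single early-exit pass that multiplies an accumulator by -1 with a zero membership test followed by a parity check of the count of negatives.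
import Mathlib
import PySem

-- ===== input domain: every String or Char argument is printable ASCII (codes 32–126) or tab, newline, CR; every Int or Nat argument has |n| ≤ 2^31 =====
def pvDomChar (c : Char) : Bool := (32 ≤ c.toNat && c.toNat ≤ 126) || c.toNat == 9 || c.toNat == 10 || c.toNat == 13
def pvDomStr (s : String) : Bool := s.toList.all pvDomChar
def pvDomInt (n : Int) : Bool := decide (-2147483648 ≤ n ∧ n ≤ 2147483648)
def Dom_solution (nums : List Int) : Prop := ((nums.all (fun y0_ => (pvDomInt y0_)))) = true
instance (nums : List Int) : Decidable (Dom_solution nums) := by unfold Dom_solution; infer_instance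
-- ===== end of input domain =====

-- B replaces A's early-exit sign-accumulating pass by a zero membership test plus a parity count of negatives (objective: simpler).

-- ===== PORT A =====
-- loop over nums with accumulator `answer`; returning 0 models the early `return 0`
def solutionLoop : List Int → Int → Int
  | [], answer => answer
  | number :: rest, answer =>
    if number = 0 then 0
    else if number < 0 then solutionLoop rest (answer * -1)
    else solutionLoop rest answer

def solution (nums : List Int) : Int := solutionLoop nums 1

-- ===== PORT B =====
def solution_alt (nums : List Int) : Int :=
  if nums.contains 0 then 0
  else
    let neg : Int := (nums.filter (fun x => decide (x < 0))).length
    if neg % 2 ≠ 0 then -1 else 1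

-- ===== PRECONDITION & SPEC =====
def Spec_solution (nums : List Int) (out : Int) : Prop := out = solution_alt nums
instance (nums : List Int) (out : Int) : Decidable (Spec_solution nums out) := by unfold Spec_solution; infer_instance

-- ===== CLAIM (what is proved, stated in full; the proofs are below) =====
def Claim_equal_solution : Prop := ∀ (nums : List Int), Dom_solution nums → Spec_solution nums (solution nums)

-- ===== LEMMAS AND PROOFS =====
theorem solutionLoop_eq (nums : List Int) (answer : Int) :
    solutionLoop nums answer =
      if nums.contains 0 then 0
      else answer * (if ((nums.filter (fun x => decide (x < 0))).length : Int) % 2 ≠ 0 then -1 else 1) := by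
  induction nums generalizing answer with
  | nil => simp [solutionLoop]
  | cons n rest ih =>
    by_cases h0 : n = 0
    · simp [solutionLoop, h0]
    · have hb : ((0 : Int) == n) = false := by simp [Ne.symm h0]
      by_cases hn : n < 0
      · simp only [solutionLoop, if_neg h0, if_pos hn, ih, List.contains_cons, hb,
          Bool.false_or, List.filter_cons, decide_eq_true hn, if_pos trivial,
          List.length_cons]
        by_cases hz : rest.contains 0
        · have hm : (0 : Int) ∈ rest := by simpa using hz
          simp [hm]
        · rw [Bool.not_eq_true] at hz
          simp only [hz, Bool.false_eq_true, if_false]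
          push_cast
          by_cases hp : ((List.filter (fun x => decide (x < 0)) rest).length : Int) % 2 = 0
          · have hp' : (((List.filter (fun x => decide (x < 0)) rest).length : Int) + 1) % 2 ≠ 0 := by
              omega
            simp only [hp, ne_eq, not_true_eq_false, if_false, if_pos hp']
            ring
          · have hp' : (((List.filter (fun x => decide (x < 0)) rest).length : Int) + 1) % 2 = 0 := by
              omega
            simp only [hp', ne_eq, not_true_eq_false, if_false, if_pos hp, not_false_eq_true, if_true]
            ring
      · have hd : decide (n < 0) = false := by simp [hn]
        simp only [solutionLoop, if_neg h0, if_neg hn, ih, List.contains_cons, hb,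
          Bool.false_or, List.filter_cons, hd, Bool.false_eq_true, if_false]

-- ===== VERDICT (by name: the statement is the Claim_ definition above) =====
theorem solution_spec : Claim_equal_solution := by
  intro nums _
  show solution nums = solution_alt nums
  simp only [solution, solution_alt, solutionLoop_eq, one_mul]
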